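-- pv_equiv track=rewrite | github.com/Ultimatereo/ITMO-UNIVERSITY | discrete-math/lab2/6.py | vectorsRecurse
-- ===== SOURCE A (Python) =====
-- def vectorsRecurse(g, n):
--     k = len(g)
--     if n <= 0:
--         return g
--     else:
--         new = []
--         for i in range(k):
--             char = "0" + g[i]
--             new.append(char)
--         for i in range(k):
--             if g[i][0] == "0":
--                 char = "1" + g[i]
--                 new.append(char)
--         g = new
--     return vectorsRecurse(g, n - 1)
-- ===== SOURCE B (Python) =====
-- def vectorsRecurse(g, n):
--     for _ in range(n):
--         g = ["0" + s for s in g] + ["1" + s for s in g if s[0] == "0"]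
--     return g
-- ===== Notes on version B (the rewrite author's own statement) =====
-- stated objective: simpler
-- what changed: Replaced the tail recursion on n (with two explicit index loops appending into a fresh list) by a plain for-loop over range(n) whose body builds the next generation as a concatenation of two comprehensions (prefix-0 map, then prefix-1 over elements starting with '0').
import Mathlib
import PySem

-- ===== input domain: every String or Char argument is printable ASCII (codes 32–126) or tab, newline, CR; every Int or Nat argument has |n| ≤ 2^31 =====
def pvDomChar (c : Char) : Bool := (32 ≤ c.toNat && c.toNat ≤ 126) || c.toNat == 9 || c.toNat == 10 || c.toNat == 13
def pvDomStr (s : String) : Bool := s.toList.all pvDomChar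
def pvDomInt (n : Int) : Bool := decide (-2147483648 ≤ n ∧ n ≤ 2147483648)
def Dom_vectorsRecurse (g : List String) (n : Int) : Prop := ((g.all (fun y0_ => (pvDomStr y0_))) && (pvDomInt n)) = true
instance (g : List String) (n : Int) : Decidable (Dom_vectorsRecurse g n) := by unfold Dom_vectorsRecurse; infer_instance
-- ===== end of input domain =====

-- B replaces A's tail recursion on n by a plain loop over range(n) whose body is
-- two comprehensions (simpler decomposition; same cost).

-- ===== PORT A =====
-- helper: the loop body of A (the 'new' Python builds when n > 0), verbatim
def pvNewA (g : List String) : List String :=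
  let k : Int := g.length
  let new := (PySem.List.pyRange 0 k 1).foldl
    (fun new i => new ++ ["0" ++ PySem.List.pyGetD g i ""]) []
  (PySem.List.pyRange 0 k 1).foldl
    (fun new i =>
      if PySem.Str.pyGet? (PySem.List.pyGetD g i "") 0 == some '0'
      then new ++ ["1" ++ PySem.List.pyGetD g i ""] else new) new

def vectorsRecurse (g : List String) (n : Int) : List String :=
  if n ≤ 0 then g
  else vectorsRecurse (pvNewA g) (n - 1)
termination_by n.toNat
decreasing_by omega

-- ===== PORT B =====
def vectorsRecurse_alt (g : List String) (n : Int) : List String :=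
  (PySem.List.pyRange 0 n 1).foldl
    (fun g _ =>
      g.map (fun s => "0" ++ s) ++
        (g.filter (fun s => PySem.Str.pyGet? s 0 == some '0')).map
          (fun s => "1" ++ s)) g

-- ===== PRECONDITION & SPEC =====
-- Pre_ excludes exactly the inputs where the Python A raises IndexError (g[i][0]
-- with an empty string in g while n > 0); B raises there too.
def Pre_vectorsRecurse (g : List String) (n : Int) : Prop := n ≤ 0 ∨ "" ∉ g
instance (g : List String) (n : Int) : Decidable (Pre_vectorsRecurse g n) := by
  unfold Pre_vectorsRecurse; infer_instance
def pvWitness_vectorsRecurse : List String × Int := (["0", "1"], 3)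
def Spec_vectorsRecurse (g : List String) (n : Int) (out : List String) : Prop := out = vectorsRecurse_alt g n
instance (g : List String) (n : Int) (out : List String) : Decidable (Spec_vectorsRecurse g n out) := by unfold Spec_vectorsRecurse; infer_instance

-- ===== CLAIM (what is proved, stated in full; the proofs are below) =====
def Claim_equal_vectorsRecurse : Prop := ∀ (g : List String) (n : Int), Dom_vectorsRecurse g n → Pre_vectorsRecurse g n → Spec_vectorsRecurse g n (vectorsRecurse g n)

-- ===== LEMMAS AND PROOFS =====

-- the body of B's loop, named for the proofs
def pvStep (g : List String) : List String :=
  g.map (fun s => "0" ++ s) ++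
    (g.filter (fun s => PySem.Str.pyGet? s 0 == some '0')).map
      (fun s => "1" ++ s)

lemma pvStep_no_empty (g : List String) : "" ∉ pvStep g := by
  unfold pvStep
  intro h
  rcases List.mem_append.mp h with h | h <;>
    · rcases List.mem_map.mp h with ⟨s, _, hs⟩
      have := congrArg String.toList hs
      simp at this

-- A's loop body computes exactly B's loop body
lemma newA_eq_step (g : List String) : pvNewA g = pvStep g := by
  show (PySem.List.pyRange 0 (g.length : Int) 1).foldl
      (fun new i =>
        if PySem.Str.pyGet? (PySem.List.pyGetD g i "") 0 == some '0'
        then new ++ ["1" ++ PySem.List.pyGetD g i ""] else new)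
      ((PySem.List.pyRange 0 (g.length : Int) 1).foldl
        (fun new i => new ++ ["0" ++ PySem.List.pyGetD g i ""]) []) = pvStep g
  rw [PySem.List.foldl_pyRange_zero_pyGetD' g "" (fun acc s => acc ++ ["0" ++ s]) [],
    PySem.List.foldl_pyRange_zero_pyGetD' g ""
      (fun acc s => if PySem.Str.pyGet? s 0 == some '0' then acc ++ ["1" ++ s] else acc),
    PySem.List.foldl_append_singleton_eq_map,
    PySem.List.foldl_append_if (fun s => PySem.Str.pyGet? s 0 == some '0') (fun s => "1" ++ s)]
  simp [pvStep]

-- B is iteration of pvStep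
lemma alt_eq_iterate (g : List String) (n : Int) :
    vectorsRecurse_alt g n = pvStep^[n.toNat] g := by
  unfold vectorsRecurse_alt
  show (PySem.List.pyRange 0 n 1).foldl (fun g _ => pvStep g) g = pvStep^[n.toNat] g
  have key : ∀ (l : List Int) (init : List String),
      l.foldl (fun g _ => pvStep g) init = pvStep^[l.length] init := by
    intro l
    induction l with
    | nil => intro init; rfl
    | cons x xs ih =>
        intro init
        simp [List.foldl_cons, ih, Function.iterate_succ_apply]
  rw [PySem.List.pyRange_one, key]
  simp

-- A is the same iteration, given no empty string in g (or n ≤ 0)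
lemma A_eq_iterate : ∀ (m : Nat) (g : List String) (n : Int), n.toNat = m →
    ("" ∉ g ∨ n ≤ 0) → vectorsRecurse g n = pvStep^[m] g := by
  intro m
  induction m with
  | zero =>
      intro g n hm _
      have hn : n ≤ 0 := by omega
      rw [vectorsRecurse, if_pos hn]
      rfl
  | succ k ih =>
      intro g n hm _
      have hn : ¬ n ≤ 0 := by omega
      rw [vectorsRecurse, if_neg hn, newA_eq_step,
        ih (pvStep g) (n - 1) (by omega) (Or.inl (pvStep_no_empty g)),
        ← Function.iterate_succ_apply]

-- ===== VERDICT (by name: the statement is the Claim_ definition above) =====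
theorem vectorsRecurse_spec : Claim_equal_vectorsRecurse := by
  unfold Claim_equal_vectorsRecurse
  intro g n _ hpre
  unfold Spec_vectorsRecurse
  rw [alt_eq_iterate, A_eq_iterate n.toNat g n rfl]
  rcases hpre with h | h
  · exact Or.inr h
  · exact Or.inl h
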